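-- pv_equiv track=rewrite | github.com/crshnburn/adventofcode2025 | day11/main.py | count_paths_with_nodes
-- ===== SOURCE A (Python) =====
-- def count_paths_with_nodes(graph, start, end, required_nodes):
--     """
--     Count paths from start to end that contain all required_nodes.
--     Uses DFS with memoization - only tracks which required nodes have been collected.
--     This is much more efficient than tracking all visited nodes.
--     """
--     memo = {}
--     required_set = frozenset(required_nodes)
--
--     def dfs(node, collected_required):
--         # Create cache key: (current node, which required nodes we've collected)
--         cache_key = (node, collected_required)
--
--         if cache_key in memo:
--             return memo[cache_key]
--
--         # Update collected required nodes if current node is one of them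
--         new_collected = collected_required
--         if node in required_set:
--             new_collected = collected_required | frozenset([node])
--
--         # If we reached the end, check if all required nodes are collected
--         if node == end:
--             result = 1 if new_collected == required_set else 0
--             memo[cache_key] = result
--             return result
--
--         # If node not in graph, dead end
--         if node not in graph:
--             memo[cache_key] = 0
--             return 0
--
--         count = 0
--         # Explore all neighbors
--         for neighbor in graph[node]:
--             count += dfs(neighbor, new_collected)
--
--         memo[cache_key] = count
--         return count
--
--     # Start DFS from the start node
--     return dfs(start, frozenset())
-- ===== SOURCE B (Python) =====
-- def count_paths_with_nodes(graph, start, end, required_nodes):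
--     """
--     Count paths from start to end containing all required_nodes, by
--     inclusion-exclusion: if some required node can lie on no start->end
--     path the answer is 0; otherwise the answer is the sum over subsets S
--     of the required nodes of (-1)^|S| times the number of paths avoiding
--     S, each counted by a DFS memoized on the node alone.
--     """
--     req = list(dict.fromkeys(required_nodes))
--
--     def reachable(src):
--         seen = {src}
--         stack = [src]
--         while stack:
--             u = stack.pop()
--             if u != end:
--                 for w in graph.get(u, ()):
--                     if w not in seen:
--                         seen.add(w)
--                         stack.append(w)
--         return seen
--
--     visited = reachable(start)
--     for r in req:
--         if r not in visited or end not in reachable(r):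
--             return 0
--
--     def subsets(xs):
--         if not xs:
--             return [[]]
--         rest = subsets(xs[1:])
--         return rest + [[xs[0]] + s for s in rest]
--
--     def count_avoiding(forbidden):
--         memo = {}
--
--         def go(node):
--             if node in forbidden:
--                 return 0
--             if node == end:
--                 return 1
--             if node in memo:
--                 return memo[node]
--             if node not in graph:
--                 return 0
--             total = sum(go(w) for w in graph[node])
--             memo[node] = total
--             return total
--
--         return go(start)
--
--     result = 0
--     for s in subsets(req):
--         result += (-1) ** len(s) * count_avoiding(set(s))
--     return result
-- ===== Notes on version B (the rewrite author's own statement) =====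
-- stated objective: alternative
-- what changed: Replaces A's single DFS over (node, collected-required-subset) states by inclusion-exclusion: B first returns 0 if some required node can lie on no start-to-end path (a cheap reachability check), and otherwise sums (-1)^|S| times the count of paths avoiding S over all subsets S of the required nodes, each count obtained by a DFS memoized on the node alone.
import Mathlib
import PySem

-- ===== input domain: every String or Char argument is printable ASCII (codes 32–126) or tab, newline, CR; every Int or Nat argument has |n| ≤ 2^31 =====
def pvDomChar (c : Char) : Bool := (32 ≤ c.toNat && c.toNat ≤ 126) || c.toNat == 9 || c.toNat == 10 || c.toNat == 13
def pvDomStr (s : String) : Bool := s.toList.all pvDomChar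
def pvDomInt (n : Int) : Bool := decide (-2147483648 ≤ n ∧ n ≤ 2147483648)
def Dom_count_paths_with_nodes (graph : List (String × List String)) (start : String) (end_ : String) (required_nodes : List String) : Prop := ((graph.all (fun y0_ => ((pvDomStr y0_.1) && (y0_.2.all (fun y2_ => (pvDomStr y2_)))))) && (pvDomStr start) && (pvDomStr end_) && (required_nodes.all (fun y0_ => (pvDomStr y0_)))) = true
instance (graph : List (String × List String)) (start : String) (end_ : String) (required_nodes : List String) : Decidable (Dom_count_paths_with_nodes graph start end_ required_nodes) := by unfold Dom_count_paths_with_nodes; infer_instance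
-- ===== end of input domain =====

-- B replaces A's DFS over (node, collected-required-subset) states by inclusion–exclusion:
-- a required node that can lie on no start→end path forces the answer 0; otherwise B sums, over
-- all subsets S of the required nodes, (-1)^|S| times the count of paths avoiding S (a DFS
-- memoized on the node alone). Equivalence is about the RETURN value; objective: alternative.

-- ===== PORT A =====
-- A's memo dict is pure caching (it never changes any returned value) and is dropped in the port;
-- the recursion is fueled: fuel graph.length+1 bounds the recursion depth on every input
-- admitted by Pre_ (the part of the graph reachable from start is acyclic).
def pvDfsA (graph : List (String × List String)) (end_ : String) (rs : PySem.Set String) : Nat → String → PySem.Set String → Int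
  | 0, _, _ => 0
  | f + 1, node, collected =>
    let newCollected := if PySem.Set.contains rs node then PySem.Set.add collected node else collected
    if node = end_ then (if PySem.Set.equal newCollected rs then 1 else 0)
    else
      match PySem.Dict.get? (PySem.Dict.mk graph) node with
      | none => 0
      | some neighbors => neighbors.foldl (fun count w => count + pvDfsA graph end_ rs f w newCollected) 0

def count_paths_with_nodes (graph : List (String × List String)) (start : String) (end_ : String) (required_nodes : List String) : Int :=
  pvDfsA graph end_ (PySem.Set.ofList required_nodes) (graph.length + 1) start PySem.Set.empty

-- ===== PORT B =====
-- successors as Source B's `reachable` expands them: end is never expanded, nodes outside the dict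
-- are dead ends
def pvSuccs (graph : List (String × List String)) (end_ : String) (v : String) : List String :=
  if v = end_ then [] else (PySem.Dict.get? (PySem.Dict.mk graph) v).getD []

def pvClosure (graph : List (String × List String)) (end_ : String) : Nat → PySem.Set String → PySem.Set String
  | 0, s => s
  | n + 1, s => pvClosure graph end_ n (PySem.Set.update s (s.flatMap (pvSuccs graph end_)))

-- Source B's `reachable(src)` worklist loop, ported as round-based closure iteration over the same
-- successor map; (#edges+1) rounds always reach the full closure, so membership is exact
def pvFuelN (graph : List (String × List String)) : Nat := (graph.flatMap (fun p => p.2)).length + 1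

def pvReach (graph : List (String × List String)) (end_ : String) (src : String) : PySem.Set String :=
  pvClosure graph end_ (pvFuelN graph) (PySem.Set.ofList [src])

-- subsets xs = all sublists (Source B's recursive `subsets` helper), rest first then those with xs[0]
def pvSubsets (xs : List String) : List (List String) :=
  match xs with
  | [] => [[]]
  | x :: tail => let rest := pvSubsets tail; rest ++ rest.map (fun s => x :: s)

-- Source B's `go`: paths from node to end_ avoiding `forbidden`; memo on the node dropped (pure
-- caching), fuel graph.length+1 as in port A.
def pvGoB (graph : List (String × List String)) (end_ : String) (forbidden : PySem.Set String) : Nat → String → Int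
  | 0, _ => 0
  | f + 1, node =>
    if PySem.Set.contains forbidden node then 0
    else if node = end_ then 1
    else
      match PySem.Dict.get? (PySem.Dict.mk graph) node with
      | none => 0
      | some neighbors => neighbors.foldl (fun total w => total + pvGoB graph end_ forbidden f w) 0

def count_paths_with_nodes_alt (graph : List (String × List String)) (start : String) (end_ : String) (required_nodes : List String) : Int :=
  let req := PySem.List.dedup required_nodes
  let visited := pvReach graph end_ start
  if req.all (fun r => visited.contains r && (pvReach graph end_ r).contains end_) then
    (pvSubsets req).foldl
      (fun result s => result + (-1) ^ s.length * pvGoB graph end_ (PySem.Set.ofList s) (graph.length + 1) start) 0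
  else 0

-- ===== PRECONDITION & SPEC =====
-- Pre_ excludes exactly the graphs with a cycle reachable from start without passing end_:
-- there Python A's recursion never terminates (RecursionError), so A returns on no such input.
-- (pvClosure below is bounded set-theoretic reachability, a shape condition on the graph's edge
-- relation — not the path-counting recursion of either port.)
def Pre_count_paths_with_nodes (graph : List (String × List String)) (start : String) (end_ : String) (required_nodes : List String) : Prop :=
  ((pvClosure graph end_ (graph.length + 1) (PySem.Set.ofList [start])).all
    (fun v => !(pvClosure graph end_ (graph.length + 1) (PySem.Set.ofList (pvSuccs graph end_ v))).contains v)) = true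

instance (graph : List (String × List String)) (start : String) (end_ : String) (required_nodes : List String) : Decidable (Pre_count_paths_with_nodes graph start end_ required_nodes) := by unfold Pre_count_paths_with_nodes; infer_instance

def pvWitness_count_paths_with_nodes : (List (String × List String)) × String × String × List String :=
  ([("a", ["b", "c"]), ("b", ["c"]), ("c", [])], "a", "c", ["b"])

def Spec_count_paths_with_nodes (graph : List (String × List String)) (start : String) (end_ : String) (required_nodes : List String) (out : Int) : Prop := out = count_paths_with_nodes_alt graph start end_ required_nodes
instance (graph : List (String × List String)) (start : String) (end_ : String) (required_nodes : List String) (out : Int) : Decidable (Spec_count_paths_with_nodes graph start end_ required_nodes out) := by unfold Spec_count_paths_with_nodes; infer_instance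

-- ===== CLAIM (what is proved, stated in full; the proofs are below) =====
def Claim_equal_count_paths_with_nodes : Prop := ∀ (graph : List (String × List String)) (start : String) (end_ : String) (required_nodes : List String), Dom_count_paths_with_nodes graph start end_ required_nodes → Pre_count_paths_with_nodes graph start end_ required_nodes → Spec_count_paths_with_nodes graph start end_ required_nodes (count_paths_with_nodes graph start end_ required_nodes)

-- ===== LEMMAS AND PROOFS =====

-- proof-only reformulation of A's recursion: carry the list of required nodes still MISSING
def pvMiss (graph : List (String × List String)) (end_ : String) : Nat → String → List String → Int
  | 0, _, _ => 0
  | f + 1, v, M =>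
    let M' := M.filter (fun x => x ≠ v)
    if v = end_ then (if M' = [] then 1 else 0)
    else
      match PySem.Dict.get? (PySem.Dict.mk graph) v with
      | none => 0
      | some ns => (ns.map (fun w => pvMiss graph end_ f w M')).sum

theorem pvFoldl_add_eq_sum {α : Type} (l : List α) (g : α → Int) (init : Int) :
    l.foldl (fun acc w => acc + g w) init = init + (l.map g).sum := by
  induction l generalizing init with
  | nil => simp
  | cons x xs ih => simp [List.foldl_cons, ih, add_assoc]

theorem pvSum_neg (l : List (List String)) (f : List String → Int) :
    (l.map (fun s => -(f s))).sum = -((l.map f).sum) := by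
  induction l with
  | nil => simp
  | cons x xs ih => simp [ih]; ring

theorem pvMem_subsets (M S : List String) (h : S ∈ pvSubsets M) : ∀ x ∈ S, x ∈ M := by
  induction M generalizing S with
  | nil => simp [pvSubsets] at h; simp [h]
  | cons a t ih =>
    simp only [pvSubsets, List.mem_append, List.mem_map] at h
    rcases h with h | ⟨s, hs, rfl⟩
    · intro x hx; exact List.mem_cons_of_mem a (ih S h x hx)
    · intro x hx
      rcases List.mem_cons.1 hx with rfl | hx
      · exact List.mem_cons_self
      · exact List.mem_cons_of_mem a (ih s hs x hx)

theorem pvSign_sum (M : List String) :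
    ((pvSubsets M).map (fun s => ((-1 : Int)) ^ s.length)).sum = if M = [] then 1 else 0 := by
  induction M with
  | nil => simp [pvSubsets]
  | cons a t ih =>
    simp only [pvSubsets, List.map_append, List.sum_append, List.map_map]
    have h1 : (pvSubsets t).map ((fun s => ((-1 : Int)) ^ s.length) ∘ (fun s => a :: s))
        = (pvSubsets t).map (fun s => -(((-1 : Int)) ^ s.length)) := by
      apply List.map_congr_left
      intro s _
      simp [Function.comp, pow_succ]
    rw [h1, pvSum_neg, ih]
    by_cases ht : t = [] <;> simp [ht]

theorem pvSum_swap (L : List (List String)) (K : List String) (t : List String → String → Int) :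
    (L.map (fun a => (K.map (t a)).sum)).sum = (K.map (fun b => (L.map (fun a => t a b)).sum)).sum := by
  induction L with
  | nil => simp
  | cons x xs ih =>
    simp only [List.map_cons, List.sum_cons, ih]
    rw [← List.sum_map_add]

-- key inclusion–exclusion step: terms whose subset contains v vanish, so the subsets of M
-- can be replaced by the subsets of M with v removed
theorem pvDrop_forbidden (v : String) (M : List String) :
    ∀ (g : List String → Int), (∀ S, v ∈ S → g S = 0) →
    ((pvSubsets M).map (fun s => ((-1 : Int)) ^ s.length * g s)).sum
      = ((pvSubsets (M.filter (fun x => x ≠ v))).map (fun s => ((-1 : Int)) ^ s.length * g s)).sum := by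
  induction M with
  | nil => intro g _; simp
  | cons a t ih =>
    intro g hg
    rw [List.filter_cons]
    by_cases hav : a = v
    · subst hav
      rw [if_neg (by simp)]
      simp only [pvSubsets, List.map_append, List.sum_append, List.map_map]
      have h0 : ((pvSubsets t).map ((fun s => ((-1 : Int)) ^ s.length * g s) ∘ (fun s => a :: s))).sum = 0 := by
        apply List.sum_eq_zero
        intro x hx
        simp only [List.mem_map] at hx
        obtain ⟨s, _, rfl⟩ := hx
        simp [Function.comp, hg (a :: s) List.mem_cons_self]
      rw [h0, add_zero]
      exact ih g hg
    · rw [if_pos (by simp [hav])]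
      simp only [pvSubsets, List.map_append, List.sum_append, List.map_map]
      have hg' : ∀ S, v ∈ S → -(g (a :: S)) = 0 := by
        intro S hS
        rw [hg (a :: S) (List.mem_cons_of_mem a hS), neg_zero]
      have hcomp : ∀ u : List String,
          ((pvSubsets u).map ((fun s => ((-1 : Int)) ^ s.length * g s) ∘ (fun s => a :: s))).sum
            = ((pvSubsets u).map (fun s => ((-1 : Int)) ^ s.length * (-(g (a :: s))))).sum := by
        intro u
        congr 1
        apply List.map_congr_left
        intro s _
        simp only [Function.comp]
        rw [List.length_cons, pow_succ]
        ring
      rw [hcomp t, hcomp (t.filter (fun x => x ≠ v)), ih g hg, ih (fun s => -(g (a :: s))) hg']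

theorem pvGoB_mem_zero (graph : List (String × List String)) (end_ : String) (f : Nat) (v : String)
    (S : List String) (hv : v ∈ S) : pvGoB graph end_ (PySem.Set.ofList S) f v = 0 := by
  cases f with
  | zero => rfl
  | succ f =>
    have : PySem.Set.contains (PySem.Set.ofList S) v = true := by
      rw [PySem.Set.contains_iff, PySem.Set.mem_ofList]; exact hv
    simp only [pvGoB]
    rw [if_pos this]

theorem pvMiss_eq_sum (graph : List (String × List String)) (end_ : String) :
    ∀ (f : Nat) (v : String) (M : List String),
      pvMiss graph end_ f v M
        = ((pvSubsets M).map (fun S => ((-1 : Int)) ^ S.length * pvGoB graph end_ (PySem.Set.ofList S) f v)).sum := by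
  intro f
  induction f with
  | zero =>
    intro v M
    simp [pvMiss, pvGoB]
  | succ f ih =>
    intro v M
    rw [pvDrop_forbidden v M (fun S => pvGoB graph end_ (PySem.Set.ofList S) (f + 1) v)
      (fun S hS => pvGoB_mem_zero graph end_ (f + 1) v S hS)]
    have hnotmem : ∀ S ∈ pvSubsets (M.filter (fun x => x ≠ v)), v ∉ S := by
      intro S hS hvS
      have := pvMem_subsets _ S hS v hvS
      have := List.of_mem_filter this
      simp at this
    have hnc : ∀ S ∈ pvSubsets (M.filter (fun x => x ≠ v)),
        PySem.Set.contains (PySem.Set.ofList S) v = false := by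
      intro S hS
      have := hnotmem S hS
      rw [← Bool.not_eq_true]
      rw [PySem.Set.contains_iff, PySem.Set.mem_ofList]
      exact this
    show pvMiss graph end_ (f + 1) v M = _
    simp only [pvMiss]
    by_cases hend : v = end_
    · rw [if_pos hend]
      have hterm : ((pvSubsets (M.filter (fun x => x ≠ v))).map
            (fun S => ((-1 : Int)) ^ S.length * pvGoB graph end_ (PySem.Set.ofList S) (f + 1) v)).sum
          = ((pvSubsets (M.filter (fun x => x ≠ v))).map (fun S => ((-1 : Int)) ^ S.length)).sum := by
        congr 1
        apply List.map_congr_left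
        intro S hS
        simp only [pvGoB]
        rw [if_neg (by rw [hnc S hS]; exact Bool.false_ne_true), if_pos hend, mul_one]
      rw [hterm, pvSign_sum]
    · rw [if_neg hend]
      cases hlk : PySem.Dict.get? (PySem.Dict.mk graph) v with
      | none =>
        symm
        apply List.sum_eq_zero
        intro x hx
        simp only [List.mem_map] at hx
        obtain ⟨S, hS, rfl⟩ := hx
        simp only [pvGoB, hlk]
        rw [if_neg (by rw [hnc S hS]; exact Bool.false_ne_true), if_neg hend, mul_zero]
      | some ns =>
        have hterm : ((pvSubsets (M.filter (fun x => x ≠ v))).map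
              (fun S => ((-1 : Int)) ^ S.length * pvGoB graph end_ (PySem.Set.ofList S) (f + 1) v)).sum
            = ((pvSubsets (M.filter (fun x => x ≠ v))).map
              (fun S => (ns.map (fun w => ((-1 : Int)) ^ S.length * pvGoB graph end_ (PySem.Set.ofList S) f w)).sum)).sum := by
          congr 1
          apply List.map_congr_left
          intro S hS
          simp only [pvGoB, hlk]
          rw [if_neg (by rw [hnc S hS]; exact Bool.false_ne_true), if_neg hend]
          rw [pvFoldl_add_eq_sum, zero_add, List.sum_map_mul_left]
        rw [hterm, pvSum_swap]
        show (ns.map (fun w => pvMiss graph end_ f w (M.filter (fun x => x ≠ v)))).sum = _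
        congr 1
        apply List.map_congr_left
        intro w _
        rw [← ih w (M.filter (fun x => x ≠ v))]

theorem pvA_eq_miss (graph : List (String × List String)) (end_ : String) (rs : List String) :
    ∀ (f : Nat) (v : String) (c : List String), (∀ x ∈ c, x ∈ rs) →
      pvDfsA graph end_ rs f v c = pvMiss graph end_ f v (rs.filter (fun x => !c.contains x)) := by
  intro f
  induction f with
  | zero => intro v c _; rfl
  | succ f ih =>
    intro v c hc
    show pvDfsA graph end_ rs (f + 1) v c = _
    simp only [pvDfsA, pvMiss]
    set c' : List String := if PySem.Set.contains rs v then PySem.Set.add c v else c with hc'def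
    have hc'sub : ∀ x ∈ c', x ∈ rs := by
      intro x hx
      rw [hc'def] at hx
      by_cases hv : PySem.Set.contains rs v
      · rw [if_pos hv] at hx
        rcases (PySem.Set.mem_add c v x).1 hx with h | rfl
        · exact hc x h
        · exact (PySem.Set.contains_iff rs x).1 hv
      · rw [if_neg hv] at hx; exact hc x hx
    have hM' : (rs.filter (fun x => !c.contains x)).filter (fun x => x ≠ v)
        = rs.filter (fun x => !c'.contains x) := by
      rw [List.filter_filter]
      apply List.filter_congr
      intro x hx
      rw [hc'def]
      by_cases hv : PySem.Set.contains rs v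
      · rw [if_pos hv]
        have : x ∈ PySem.Set.add c v ↔ x ∈ c ∨ x = v := PySem.Set.mem_add c v x
        by_cases hxc : x ∈ c <;> by_cases hxv : x = v <;>
          simp [this, hxc, hxv]
      · rw [if_neg hv]
        have hvrs : v ∉ rs := fun h => hv ((PySem.Set.contains_iff rs v).2 h)
        have hxv : x ≠ v := fun h => hvrs (h ▸ hx)
        simp [hxv]
    rw [hM']
    by_cases hend : v = end_
    · rw [if_pos hend, if_pos hend]
      have hiff : PySem.Set.equal c' rs = true ↔ rs.filter (fun x => !c'.contains x) = [] := by
        rw [PySem.Set.equal_iff, List.filter_eq_nil_iff]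
        constructor
        · intro h a ha
          simp [(h a).2 ha]
        · intro h x
          constructor
          · exact hc'sub x
          · intro hx
            have := h x hx
            simpa using this
      by_cases he : PySem.Set.equal c' rs
      · rw [if_pos he, if_pos (hiff.1 he)]
      · rw [if_neg he, if_neg (fun h => he (hiff.2 h))]
    · rw [if_neg hend, if_neg hend]
      cases hlk : PySem.Dict.get? (PySem.Dict.mk graph) v with
      | none => rfl
      | some ns =>
        show (ns.foldl (fun count w => count + pvDfsA graph end_ rs f w c') 0)
            = (ns.map (fun w => pvMiss graph end_ f w (rs.filter (fun x => !c'.contains x)))).sum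
        rw [pvFoldl_add_eq_sum, zero_add]
        congr 1
        apply List.map_congr_left
        intro w _
        exact ih w c' hc'sub

-- ===== closure facts: pvClosure with fuel pvFuelN is the full, successor-closed reachable set =====

theorem pvGet?_values (graph : List (String × List String)) (v : String) (ns : List String)
    (h : PySem.Dict.get? (PySem.Dict.mk graph) v = some ns) :
    ∀ w ∈ ns, w ∈ graph.flatMap (fun p => p.2) := by
  induction graph with
  | nil => simp [PySem.Dict.get?] at h
  | cons p rest ih =>
    rw [show PySem.Dict.mk (p :: rest) = PySem.Dict.mk ((p.1, p.2) :: rest) by rfl,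
      PySem.Dict.get?_mk_cons] at h
    by_cases hk : p.1 == v
    · rw [if_pos hk] at h
      cases h
      intro w hw
      exact List.mem_flatMap.2 ⟨p, List.mem_cons_self, hw⟩
    · rw [if_neg hk] at h
      intro w hw
      have := ih h w hw
      simp only [List.flatMap_cons, List.mem_append]
      exact Or.inr (List.mem_flatMap.1 this |> fun ⟨q, hq, hwq⟩ => List.mem_flatMap.2 ⟨q, hq, hwq⟩)

theorem pvSuccs_values (graph : List (String × List String)) (end_ v w : String)
    (h : w ∈ pvSuccs graph end_ v) : w ∈ graph.flatMap (fun p => p.2) := by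
  unfold pvSuccs at h
  by_cases hv : v = end_
  · rw [if_pos hv] at h; simp at h
  · rw [if_neg hv] at h
    cases hlk : PySem.Dict.get? (PySem.Dict.mk graph) v with
    | none => rw [hlk] at h; simp at h
    | some ns => rw [hlk] at h; exact pvGet?_values graph v ns hlk w h

theorem pvClosure_sub (graph : List (String × List String)) (end_ : String) :
    ∀ (n : Nat) (s : List String), s ⊆ pvClosure graph end_ n s := by
  intro n
  induction n with
  | zero => intro s; exact fun _ h => h
  | succ n ih =>
    intro s x hx
    exact ih _ ((PySem.Set.mem_update _ _ _).2 (Or.inl hx))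

theorem pvClosure_of_fix (graph : List (String × List String)) (end_ : String) :
    ∀ (n : Nat) (s : List String),
      PySem.Set.update s (s.flatMap (pvSuccs graph end_)) = s → pvClosure graph end_ n s = s := by
  intro n
  induction n with
  | zero => intro s _; rfl
  | succ n ih =>
    intro s hfx
    show pvClosure graph end_ n (PySem.Set.update s (s.flatMap (pvSuccs graph end_))) = s
    rw [hfx]
    exact ih s hfx

theorem pvFix_closed (graph : List (String × List String)) (end_ : String) (s : List String)
    (hfx : PySem.Set.update s (s.flatMap (pvSuccs graph end_)) = s) :
    ∀ v ∈ s, ∀ w ∈ pvSuccs graph end_ v, w ∈ s := by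
  intro v hv w hw
  have hmem : w ∈ s.flatMap (pvSuccs graph end_) := List.mem_flatMap.2 ⟨v, hv, hw⟩
  rw [PySem.Set.update_eq_append_filter] at hfx
  have hnil := List.append_right_eq_self.mp hfx
  rw [List.filter_eq_nil_iff] at hnil
  cases hc : PySem.Set.contains s w with
  | true => exact (PySem.Set.contains_iff s w).1 hc
  | false =>
    exfalso
    have h := hnil w ((PySem.Set.mem_ofList _ _).2 hmem)
    rw [hc] at h
    exact h rfl

theorem pvClosure_closed (graph : List (String × List String)) (end_ : String) (U : List String)
    (hvals : ∀ x ∈ graph.flatMap (fun p => p.2), x ∈ U) :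
    ∀ (n : Nat) (s : List String), s.Nodup → (∀ x ∈ s, x ∈ U) →
      U.toFinset.card + 1 ≤ n + s.length →
      ∀ v ∈ pvClosure graph end_ n s, ∀ w ∈ pvSuccs graph end_ v, w ∈ pvClosure graph end_ n s := by
  intro n
  induction n with
  | zero =>
    intro s hnd hsub hcard
    exfalso
    have h1 : s.toFinset.card = s.length := List.toFinset_card_of_nodup hnd
    have h2 : s.toFinset ⊆ U.toFinset := by
      intro x hx
      exact List.mem_toFinset.2 (hsub x (List.mem_toFinset.1 hx))
    have := Finset.card_le_card h2
    omega
  | succ n ih =>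
    intro s hnd hsub hcard
    by_cases hfx : PySem.Set.update s (s.flatMap (pvSuccs graph end_)) = s
    · have hC : pvClosure graph end_ (n + 1) s = s := by
        show pvClosure graph end_ n (PySem.Set.update s (s.flatMap (pvSuccs graph end_))) = s
        rw [hfx]
        exact pvClosure_of_fix graph end_ n s hfx
      rw [hC]
      exact pvFix_closed graph end_ s hfx
    · have hstep : pvClosure graph end_ (n + 1) s
          = pvClosure graph end_ n (PySem.Set.update s (s.flatMap (pvSuccs graph end_))) := rfl
      rw [hstep]
      apply ih
      · exact PySem.Set.nodup_update _ _ hnd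
      · intro x hx
        rcases (PySem.Set.mem_update _ _ _).1 hx with h | h
        · exact hsub x h
        · obtain ⟨v, _, hw⟩ := List.mem_flatMap.1 h
          exact hvals x (pvSuccs_values graph end_ v x hw)
      · have hlen : s.length + 1 ≤ (PySem.Set.update s (s.flatMap (pvSuccs graph end_))).length := by
          rw [PySem.Set.update_eq_append_filter]
          have : (PySem.Set.ofList (s.flatMap (pvSuccs graph end_))).filter
              (fun y => !(PySem.Set.contains s y)) ≠ [] := by
            intro hnil
            apply hfx
            rw [PySem.Set.update_eq_append_filter, hnil, List.append_nil]
          rw [List.length_append]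
          have := List.length_pos_of_ne_nil this
          omega
        omega

-- A's count is 0 when the recursion, started inside a successor-closed set V that misses end_,
-- can never reach the end node
theorem pvMiss_zero_noend (graph : List (String × List String)) (end_ : String) (V : List String)
    (hcl : ∀ v ∈ V, ∀ w ∈ pvSuccs graph end_ v, w ∈ V) (hend : end_ ∉ V) :
    ∀ (f : Nat) (v : String) (M : List String), v ∈ V → pvMiss graph end_ f v M = 0 := by
  intro f
  induction f with
  | zero => intro v M _; rfl
  | succ f ih =>
    intro v M hv
    simp only [pvMiss]
    have hvend : ¬ v = end_ := fun h => hend (h ▸ hv)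
    rw [if_neg hvend]
    cases hlk : PySem.Dict.get? (PySem.Dict.mk graph) v with
    | none => rfl
    | some ns =>
      apply List.sum_eq_zero
      intro x hx
      simp only [List.mem_map] at hx
      obtain ⟨w, hw, rfl⟩ := hx
      have hwv : w ∈ pvSuccs graph end_ v := by
        unfold pvSuccs
        rw [if_neg hvend, hlk]
        exact hw
      exact ih w _ (hcl v hv w hwv)

-- A's count is 0 when some required node r lies outside the successor-closed set V the
-- recursion moves in (r is never visited, hence never collected)
theorem pvMiss_zero_unvisited (graph : List (String × List String)) (end_ : String)
    (V : List String) (r : String)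
    (hcl : ∀ v ∈ V, ∀ w ∈ pvSuccs graph end_ v, w ∈ V) (hr : r ∉ V) :
    ∀ (f : Nat) (v : String) (M : List String), v ∈ V → r ∈ M → pvMiss graph end_ f v M = 0 := by
  intro f
  induction f with
  | zero => intro v M _ _; rfl
  | succ f ih =>
    intro v M hv hrM
    simp only [pvMiss]
    have hrv : r ≠ v := fun h => hr (h ▸ hv)
    have hrM' : r ∈ M.filter (fun x => x ≠ v) := List.mem_filter.2 ⟨hrM, by simp [hrv]⟩
    by_cases hvend : v = end_
    · rw [if_pos hvend, if_neg (List.ne_nil_of_mem hrM')]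
    · rw [if_neg hvend]
      cases hlk : PySem.Dict.get? (PySem.Dict.mk graph) v with
      | none => rfl
      | some ns =>
        apply List.sum_eq_zero
        intro x hx
        simp only [List.mem_map] at hx
        obtain ⟨w, hw, rfl⟩ := hx
        have hwv : w ∈ pvSuccs graph end_ v := by
          unfold pvSuccs
          rw [if_neg hvend, hlk]
          exact hw
        exact ih w _ (hcl v hv w hwv) hrM'

-- A's count is 0 when some required node r still missing cannot reach end_: V is a
-- successor-closed set containing r but not end_
theorem pvMiss_zero_deadreq (graph : List (String × List String)) (end_ : String)
    (V : List String) (r : String)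
    (hcl : ∀ v ∈ V, ∀ w ∈ pvSuccs graph end_ v, w ∈ V) (hrV : r ∈ V) (hend : end_ ∉ V) :
    ∀ (f : Nat) (v : String) (M : List String), r ∈ M → pvMiss graph end_ f v M = 0 := by
  intro f
  induction f with
  | zero => intro v M _; rfl
  | succ f ih =>
    intro v M hrM
    simp only [pvMiss]
    have hrend : r ≠ end_ := fun h => hend (h ▸ hrV)
    by_cases hvend : v = end_
    · have hrv : r ≠ v := fun h => hrend (h.trans hvend)
      have hrM' : r ∈ M.filter (fun x => x ≠ v) := List.mem_filter.2 ⟨hrM, by simp [hrv]⟩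
      rw [if_pos hvend, if_neg (List.ne_nil_of_mem hrM')]
    · rw [if_neg hvend]
      cases hlk : PySem.Dict.get? (PySem.Dict.mk graph) v with
      | none => rfl
      | some ns =>
        apply List.sum_eq_zero
        intro x hx
        simp only [List.mem_map] at hx
        obtain ⟨w, hw, rfl⟩ := hx
        have hwv : w ∈ pvSuccs graph end_ v := by
          unfold pvSuccs
          rw [if_neg hvend, hlk]
          exact hw
        by_cases hvr : v = r
        · exact pvMiss_zero_noend graph end_ V hcl hend f w _ (hcl v (hvr ▸ hrV) w hwv)
        · have hrv : r ≠ v := fun h => hvr h.symm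
          exact ih w _ (List.mem_filter.2 ⟨hrM, by simp [hrv]⟩)

theorem pvReach_closed (graph : List (String × List String)) (end_ : String) (src : String) :
    ∀ v ∈ pvReach graph end_ src, ∀ w ∈ pvSuccs graph end_ v, w ∈ pvReach graph end_ src := by
  apply pvClosure_closed graph end_ (src :: graph.flatMap (fun p => p.2))
    (fun x hx => List.mem_cons_of_mem src hx)
  · exact PySem.Set.nodup_ofList _
  · intro x hx
    rw [PySem.Set.mem_ofList] at hx
    simp only [List.mem_singleton] at hx
    simp [hx]
  · have h1 : (src :: graph.flatMap (fun p => p.2)).toFinset.card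
        ≤ (src :: graph.flatMap (fun p => p.2)).length := List.toFinset_card_le _
    simp only [List.length_cons] at h1
    have h2 : (PySem.Set.ofList [src] : List String).length = 1 := rfl
    unfold pvFuelN
    omega

theorem pvSrc_mem_reach (graph : List (String × List String)) (end_ : String) (src : String) :
    src ∈ pvReach graph end_ src :=
  pvClosure_sub graph end_ (pvFuelN graph) _ (by simp [PySem.Set.ofList])

-- ===== VERDICT (by name: the statement is the Claim_ definition above) =====
theorem count_paths_with_nodes_spec : Claim_equal_count_paths_with_nodes := by
  intro graph start end_ required_nodes _ _
  unfold Spec_count_paths_with_nodes count_paths_with_nodes count_paths_with_nodes_alt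
  rw [pvA_eq_miss graph end_ (PySem.Set.ofList required_nodes) (graph.length + 1) start
    PySem.Set.empty (fun x hx => absurd hx (List.not_mem_nil))]
  have hfil : (PySem.Set.ofList required_nodes).filter (fun x => !List.contains PySem.Set.empty x)
      = PySem.Set.ofList required_nodes := by
    simp [PySem.Set.empty]
  rw [hfil]
  show _ = (if (PySem.List.dedup required_nodes).all
        (fun r => (pvReach graph end_ start).contains r && (pvReach graph end_ r).contains end_) then
      (pvSubsets (PySem.List.dedup required_nodes)).foldl
        (fun result s => result + (-1) ^ s.length * pvGoB graph end_ (PySem.Set.ofList s) (graph.length + 1) start) 0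
    else 0)
  simp only [PySem.List.dedup_eq_ofList]
  by_cases hall : (PySem.Set.ofList required_nodes).all
      (fun r => (pvReach graph end_ start).contains r && (pvReach graph end_ r).contains end_)
  · rw [if_pos hall, pvMiss_eq_sum, pvFoldl_add_eq_sum, zero_add]
  · rw [if_neg hall]
    simp only [List.all_eq_true, not_forall] at hall
    obtain ⟨r, hrM, hrcond⟩ := hall
    rw [Bool.not_eq_true, Bool.and_eq_false_iff] at hrcond
    rcases hrcond with h | h
    · -- r is never visited from start
      have hrnot : r ∉ pvReach graph end_ start := by
        intro hmem
        have := (PySem.Set.contains_iff _ _).2 hmem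
        rw [h] at this
        exact Bool.false_ne_true this
      exact pvMiss_zero_unvisited graph end_ (pvReach graph end_ start) r
        (pvReach_closed graph end_ start) hrnot (graph.length + 1) start _
        (pvSrc_mem_reach graph end_ start) hrM
    · -- end_ is not reachable from r
      have hendnot : end_ ∉ pvReach graph end_ r := by
        intro hmem
        have := (PySem.Set.contains_iff _ _).2 hmem
        rw [h] at this
        exact Bool.false_ne_true this
      exact pvMiss_zero_deadreq graph end_ (pvReach graph end_ r) r
        (pvReach_closed graph end_ r) (pvSrc_mem_reach graph end_ r) hendnot
        (graph.length + 1) start _ hrM
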